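-- pv_equiv track=rewrite | github.com/bloomberg/chromium.bb | src/content/test/gpu/gpu_tests/gpu_helper.py | EvaluateVersionComparison
-- ===== SOURCE A (Python) =====
-- def EvaluateVersionComparison(version,
--                               operation,
--                               ref_version,
--                               os_name=None,
--                               driver_vendor=None):
--   def parse_version(ver):
--     if ver.isdigit():
--       return int(ver), ''
--     for i in range(0, len(ver)):
--       if not ver[i].isdigit():
--         return int(ver[:i]) if i > 0 else 0, ver[i:]
--
--   def versions_can_be_compared(ver_list1, ver_list2):
--     # If either of the two versions doesn't match the Intel driver version
--     # schema, they should not be compared.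
--     if len(ver_list1) != 4 or len(ver_list2) != 4:
--       return False
--     return True
--
--   ver_list1 = version.split('.')
--   ver_list2 = ref_version.split('.')
--   # On Windows, if the driver vendor is Intel, the driver version should be
--   # compared based on the Intel graphics driver version schema.
--   # https://www.intel.com/content/www/us/en/support/articles/000005654/graphics-drivers.html
--   if os_name == 'win' and driver_vendor == 'intel':
--     if not versions_can_be_compared(ver_list1, ver_list2):
--       return operation == 'ne'
--
--     ver_list1 = ver_list1[2:]
--     ver_list2 = ver_list2[2:]
--
--   for i in range(0, max(len(ver_list1), len(ver_list2))):
--     ver1 = ver_list1[i] if i < len(ver_list1) else '0'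
--     ver2 = ver_list2[i] if i < len(ver_list2) else '0'
--     num1, suffix1 = parse_version(ver1)
--     num2, suffix2 = parse_version(ver2)
--
--     if not num1 == num2:
--       diff = num1 - num2
--     elif suffix1 == suffix2:
--       continue
--     elif suffix1 > suffix2:
--       diff = 1
--     else:
--       diff = -1
--
--     if operation == 'eq':
--       return False
--     elif operation == 'ne':
--       return True
--     elif operation == 'ge' or operation == 'gt':
--       return diff > 0
--     elif operation == 'le' or operation == 'lt':
--       return diff < 0
--     raise Exception('Invalid operation: ' + operation)
--
--   return operation == 'eq' or operation == 'ge' or operation == 'le'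
-- ===== SOURCE B (Python) =====
-- def EvaluateVersionComparison(version,
--                               operation,
--                               ref_version,
--                               os_name=None,
--                               driver_vendor=None):
--   v1 = version.split('.')
--   v2 = ref_version.split('.')
--   if os_name == 'win' and driver_vendor == 'intel':
--     if len(v1) != 4 or len(v2) != 4:
--       return operation == 'ne'
--     v1, v2 = v1[2:], v2[2:]
--
--   def key(comps, n):
--     out = []
--     for c in comps + ['0'] * (n - len(comps)):
--       j = next((k for k, ch in enumerate(c) if not ch.isdigit()), len(c))
--       out.append((int(c[:j]) if j else 0, c[j:]))
--     return out
--
--   n = max(len(v1), len(v2))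
--   k1 = key(v1, n)
--   k2 = key(v2, n)
--   if k1 == k2:
--     return operation in ('eq', 'ge', 'le')
--   if operation == 'eq':
--     return False
--   if operation == 'ne':
--     return True
--   if operation in ('ge', 'gt'):
--     return k1 > k2
--   if operation in ('le', 'lt'):
--     return k1 < k2
--   raise Exception('Invalid operation: ' + operation)
-- ===== Notes on version B (the rewrite author's own statement) =====
-- stated objective: alternative
-- what changed: B builds, for each version, a padded list of (int, suffix) sort keys and answers each operation with whole-list comparisons (k1 == k2, k1 > k2, k1 < k2, the way Python compares lists of tuples), eliminating A's single scan with inline operator dispatch at the first differing component.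
-- outside the precondition, e.g. on EvaluateVersionComparison('2.', 'lt', '1.', None, None): A returns False, B returns False; on EvaluateVersionComparison('01', 'foo', '1', None, None): A returns False, B returns False; on EvaluateVersionComparison('1.', 'eq', '1.', None, None): A raises TypeError, B returns True
import Mathlib
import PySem

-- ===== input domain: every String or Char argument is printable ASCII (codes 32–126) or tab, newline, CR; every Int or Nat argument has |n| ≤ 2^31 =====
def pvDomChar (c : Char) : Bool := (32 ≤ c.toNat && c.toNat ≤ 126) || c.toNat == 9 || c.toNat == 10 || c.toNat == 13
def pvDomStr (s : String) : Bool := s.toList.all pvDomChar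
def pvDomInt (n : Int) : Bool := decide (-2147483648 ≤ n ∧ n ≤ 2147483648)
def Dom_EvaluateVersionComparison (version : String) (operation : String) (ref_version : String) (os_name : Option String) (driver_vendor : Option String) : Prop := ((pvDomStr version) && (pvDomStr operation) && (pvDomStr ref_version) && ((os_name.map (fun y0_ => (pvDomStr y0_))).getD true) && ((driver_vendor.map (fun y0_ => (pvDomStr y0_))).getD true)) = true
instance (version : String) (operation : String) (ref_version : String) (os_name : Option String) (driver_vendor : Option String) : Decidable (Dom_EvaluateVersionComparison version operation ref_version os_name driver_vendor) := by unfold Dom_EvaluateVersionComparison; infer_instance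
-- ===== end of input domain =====

-- B replaces A's scan-with-inline-operator-dispatch by building padded (int, suffix) sort-key
-- lists for both versions and answering with whole-list comparisons (==, >, <) the way Python
-- compares lists of tuples; objective: alternative decomposition, same asymptotic cost.

-- ===== PORT A =====
-- parse_version's for-loop over indices (returns none where Python's parse_version returns None,
-- i.e. where the caller's tuple-unpacking raises TypeError — excluded by Pre_).
def pvParseScanA (ver : List Char) (i : Nat) : Option (Int × List Char) :=
  if h : i < ver.length then
    if ¬ PySem.Chars.isdigit ver[i] then
      -- ver[:i] / ver[i:] with 0 ≤ i ≤ len are exactly take/drop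
      some ((if 0 < i then (PySem.Int.ofChars? (ver.take i)).getD 0 else 0), ver.drop i)
    else pvParseScanA ver (i + 1)
  else none
termination_by ver.length - i

def pvParseVersionA (ver : List Char) : Option (Int × List Char) :=
  if PySem.Chars.strIsdigit ver then some ((PySem.Int.ofChars? ver).getD 0, [])
  else pvParseScanA ver 0

def pvVersionsCanBeComparedA (l1 l2 : List (List Char)) : Bool :=
  if l1.length ≠ 4 ∨ l2.length ≠ 4 then false else true

-- A's main for-loop; `false` marks Python raise points (TypeError / invalid-operation Exception),
-- both excluded by Pre_.
def pvMainA (v1 v2 : List (List Char)) (operation : String) (n i : Nat) : Bool :=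
  if i < n then
    let ver1 := if i < v1.length then v1.getD i [] else ['0']
    let ver2 := if i < v2.length then v2.getD i [] else ['0']
    match pvParseVersionA ver1, pvParseVersionA ver2 with
    | some (num1, suffix1), some (num2, suffix2) =>
      let diff? : Option Int :=
        if ¬ (num1 = num2) then some (num1 - num2)
        else if suffix1 = suffix2 then none      -- continue
        else if suffix2 < suffix1 then some 1
        else some (-1)
      match diff? with
      | none => pvMainA v1 v2 operation n (i + 1)
      | some diff =>
        if operation = "eq" then false
        else if operation = "ne" then true
        else if operation = "ge" ∨ operation = "gt" then decide (diff > 0)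
        else if operation = "le" ∨ operation = "lt" then decide (diff < 0)
        else false                               -- raise Exception('Invalid operation: ...')
    | _, _ => false                              -- TypeError unpacking None
  else decide (operation = "eq" ∨ operation = "ge" ∨ operation = "le")
termination_by n - i

def EvaluateVersionComparison (version : String) (operation : String) (ref_version : String) (os_name : Option String) (driver_vendor : Option String) : Bool :=
  let ver_list1 := ((PySem.Str.split? version ".").getD []).map String.toList
  let ver_list2 := ((PySem.Str.split? ref_version ".").getD []).map String.toList
  if os_name = some "win" ∧ driver_vendor = some "intel" then
    if ¬ pvVersionsCanBeComparedA ver_list1 ver_list2 then decide (operation = "ne")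
    else
      pvMainA (PySem.List.slice ver_list1 (some 2) none) (PySem.List.slice ver_list2 (some 2) none)
        operation (max (PySem.List.slice ver_list1 (some 2) none).length
                       (PySem.List.slice ver_list2 (some 2) none).length) 0
  else pvMainA ver_list1 ver_list2 operation (max ver_list1.length ver_list2.length) 0

-- ===== PORT B =====
-- Source B's per-component sort key: the first non-digit index via next(enumerate(...)) is findIdx
def pvKeyOne (c : List Char) : Int × List Char :=
  let j := c.findIdx (fun ch => !(PySem.Chars.isdigit ch))
  ((if 0 < j then (PySem.Int.ofChars? (c.take j)).getD 0 else 0), c.drop j)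

-- Source B's key(comps, n): map the key over the '0'-padded component list
def pvKeyList (comps : List (List Char)) (n : Nat) : List (Int × List Char) :=
  (comps ++ List.replicate (n - comps.length) ['0']).map pvKeyOne

-- Python's `>` / `<` on lists of (int, str) tuples, transliterated (prefix rule for unequal lengths)
def pvListGt : List (Int × List Char) → List (Int × List Char) → Bool
  | [], _ => false
  | _ :: _, [] => true
  | a :: as, b :: bs =>
    if a = b then pvListGt as bs
    else decide (b.1 < a.1) || (a.1 == b.1 && decide (b.2 < a.2))

def pvListLt : List (Int × List Char) → List (Int × List Char) → Bool
  | _, [] => false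
  | [], _ :: _ => true
  | a :: as, b :: bs =>
    if a = b then pvListLt as bs
    else decide (a.1 < b.1) || (a.1 == b.1 && decide (a.2 < b.2))

def pvAnswerB (v1 v2 : List (List Char)) (operation : String) : Bool :=
  let n := max v1.length v2.length
  let k1 := pvKeyList v1 n
  let k2 := pvKeyList v2 n
  if k1 = k2 then decide (operation = "eq" ∨ operation = "ge" ∨ operation = "le")
  else if operation = "eq" then false
  else if operation = "ne" then true
  else if operation = "ge" ∨ operation = "gt" then pvListGt k1 k2
  else if operation = "le" ∨ operation = "lt" then pvListLt k1 k2
  else false                                     -- raise Exception('Invalid operation: ...')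

def EvaluateVersionComparison_alt (version : String) (operation : String) (ref_version : String) (os_name : Option String) (driver_vendor : Option String) : Bool :=
  let v1 := ((PySem.Str.split? version ".").getD []).map String.toList
  let v2 := ((PySem.Str.split? ref_version ".").getD []).map String.toList
  if os_name = some "win" ∧ driver_vendor = some "intel" then
    if v1.length ≠ 4 ∨ v2.length ≠ 4 then decide (operation = "ne")
    else pvAnswerB (PySem.List.slice v1 (some 2) none) (PySem.List.slice v2 (some 2) none) operation
  else pvAnswerB v1 v2 operation

-- ===== PRECONDITION & SPEC =====
-- Pre_ excludes inputs on which A raises: an empty dot-separated component reached by the scan raises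
-- TypeError, and an unrecognised operation raises Exception once the versions differ; it keeps the
-- Intel length-shortcut inputs (no parsing happens) and identical version strings under any
-- operation (no difference is ever found).  A still returns on a few excluded inputs (difference
-- found before an empty component, or distinct strings that parse equal under an unrecognised
-- operation) and B returns the same value there anyway.
def Pre_EvaluateVersionComparison (version : String) (operation : String) (ref_version : String) (os_name : Option String) (driver_vendor : Option String) : Prop :=
  (os_name = some "win" ∧ driver_vendor = some "intel" ∧
    (((PySem.Str.split? version ".").getD []).length ≠ 4 ∨
     ((PySem.Str.split? ref_version ".").getD []).length ≠ 4))
  ∨ ((∀ c ∈ (PySem.Str.split? version ".").getD [], c ≠ "")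
    ∧ (∀ c ∈ (PySem.Str.split? ref_version ".").getD [], c ≠ "")
    ∧ ((operation = "eq" ∨ operation = "ne" ∨ operation = "ge" ∨ operation = "gt" ∨ operation = "le" ∨ operation = "lt")
       ∨ version = ref_version))
instance (version : String) (operation : String) (ref_version : String) (os_name : Option String) (driver_vendor : Option String) : Decidable (Pre_EvaluateVersionComparison version operation ref_version os_name driver_vendor) := by unfold Pre_EvaluateVersionComparison; infer_instance

def pvWitness_EvaluateVersionComparison : String × String × String × Option String × Option String :=
  ("25.20.100.6444", "ge", "25.20.100.6000", some "win", some "intel")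

def Spec_EvaluateVersionComparison (version : String) (operation : String) (ref_version : String) (os_name : Option String) (driver_vendor : Option String) (out : Bool) : Prop := out = EvaluateVersionComparison_alt version operation ref_version os_name driver_vendor
instance (version : String) (operation : String) (ref_version : String) (os_name : Option String) (driver_vendor : Option String) (out : Bool) : Decidable (Spec_EvaluateVersionComparison version operation ref_version os_name driver_vendor out) := by unfold Spec_EvaluateVersionComparison; infer_instance

-- ===== CLAIM (what is proved, stated in full; the proofs are below) =====
def Claim_equal_EvaluateVersionComparison : Prop := ∀ (version : String) (operation : String) (ref_version : String) (os_name : Option String) (driver_vendor : Option String), Dom_EvaluateVersionComparison version operation ref_version os_name driver_vendor → Pre_EvaluateVersionComparison version operation ref_version os_name driver_vendor → Spec_EvaluateVersionComparison version operation ref_version os_name driver_vendor (EvaluateVersionComparison version operation ref_version os_name driver_vendor)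

-- ===== LEMMAS AND PROOFS =====

-- proof-only helpers: the length of the digit prefix, the sign of the first differing key pair,
-- and the common dispatch both programs reduce to
def pvDigitPrefixLen : List Char → Nat
  | [] => 0
  | c :: cs => if PySem.Chars.isdigit c then pvDigitPrefixLen cs + 1 else 0

def pvSign : List ((Int × List Char) × (Int × List Char)) → Int
  | [] => 0
  | ((n1, s1), (n2, s2)) :: rest =>
    if n1 ≠ n2 then (if n2 < n1 then 1 else -1)
    else if s1 ≠ s2 then (if s2 < s1 then 1 else -1)
    else pvSign rest

def pvRes (operation : String) (sign : Int) : Bool :=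
  if sign = 0 then decide (operation = "eq" ∨ operation = "ge" ∨ operation = "le")
  else if operation = "eq" then false
  else if operation = "ne" then true
  else if operation = "ge" ∨ operation = "gt" then decide (sign > 0)
  else if operation = "le" ∨ operation = "lt" then decide (sign < 0)
  else false

lemma pvPrefixLen_le (ver : List Char) : pvDigitPrefixLen ver ≤ ver.length := by
  induction ver with
  | nil => simp [pvDigitPrefixLen]
  | cons c cs ih => simp only [pvDigitPrefixLen, List.length_cons]; split <;> omega

lemma pvPrefixLen_all {ver : List Char} (h : ∀ c ∈ ver, PySem.Chars.isdigit c) :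
    pvDigitPrefixLen ver = ver.length := by
  induction ver with
  | nil => rfl
  | cons c cs ih =>
    simp only [pvDigitPrefixLen, List.length_cons]
    rw [if_pos (h c (List.mem_cons_self ..)), ih (fun x hx => h x (List.mem_cons_of_mem _ hx))]

lemma pvAll_of_prefixLen_eq {ver : List Char} (h : pvDigitPrefixLen ver = ver.length) :
    ∀ c ∈ ver, PySem.Chars.isdigit c := by
  induction ver with
  | nil => simp
  | cons c cs ih =>
    simp only [pvDigitPrefixLen, List.length_cons] at h
    by_cases hc : PySem.Chars.isdigit c
    · rw [if_pos hc] at h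
      intro x hx
      rcases List.mem_cons.1 hx with rfl | hx
      · exact hc
      · exact ih (by omega) x hx
    · rw [if_neg hc] at h
      have := pvPrefixLen_le cs
      omega

lemma pvFindIdx_eq (c : List Char) :
    c.findIdx (fun ch => !(PySem.Chars.isdigit ch)) = pvDigitPrefixLen c := by
  induction c with
  | nil => rfl
  | cons x xs ih =>
    rw [List.findIdx_cons]
    by_cases hx : PySem.Chars.isdigit x
    · simp [pvDigitPrefixLen, hx, ih]
    · simp [pvDigitPrefixLen, hx]

lemma pvScanA_eq (ver : List Char) (i : Nat) :
    pvParseScanA ver i =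
      (if i + pvDigitPrefixLen (ver.drop i) < ver.length then
        some ((if 0 < i + pvDigitPrefixLen (ver.drop i) then
                 (PySem.Int.ofChars? (ver.take (i + pvDigitPrefixLen (ver.drop i)))).getD 0 else 0),
              ver.drop (i + pvDigitPrefixLen (ver.drop i)))
       else none) := by
  suffices H : ∀ k i, ver.length - i ≤ k → pvParseScanA ver i =
      (if i + pvDigitPrefixLen (ver.drop i) < ver.length then
        some ((if 0 < i + pvDigitPrefixLen (ver.drop i) then
                 (PySem.Int.ofChars? (ver.take (i + pvDigitPrefixLen (ver.drop i)))).getD 0 else 0),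
              ver.drop (i + pvDigitPrefixLen (ver.drop i)))
       else none) from H _ i le_rfl
  intro k
  induction k with
  | zero =>
    intro i hi
    have h : ¬ i < ver.length := by omega
    rw [pvParseScanA, dif_neg h, List.drop_eq_nil_of_le (by omega)]
    simp only [pvDigitPrefixLen]
    rw [if_neg (by omega)]
  | succ k ih =>
    intro i hi
    by_cases h : i < ver.length
    · rw [pvParseScanA, dif_pos h]
      rw [List.drop_eq_getElem_cons h]
      by_cases hd : PySem.Chars.isdigit ver[i]
      · rw [if_neg (by simp [hd])]
        simp only [pvDigitPrefixLen, if_pos hd]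
        have harith : i + (pvDigitPrefixLen (ver.drop (i + 1)) + 1)
            = (i + 1) + pvDigitPrefixLen (ver.drop (i + 1)) := by omega
        rw [harith]
        exact ih (i + 1) (by omega)
      · rw [if_pos (by simp [hd])]
        simp only [pvDigitPrefixLen, if_neg hd, Nat.add_zero]
        rw [if_pos h, ← List.drop_eq_getElem_cons h]
    · have hi' : ver.length - i ≤ 0 := by omega
      rw [pvParseScanA, dif_neg h, List.drop_eq_nil_of_le (by omega)]
      simp only [pvDigitPrefixLen]
      rw [if_neg (by omega)]

lemma pvParse_agree {ver : List Char} (h : ver ≠ []) :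
    pvParseVersionA ver = some (pvKeyOne ver) := by
  unfold pvParseVersionA pvKeyOne
  rw [pvFindIdx_eq]
  by_cases hd : PySem.Chars.strIsdigit ver
  · rw [if_pos hd]
    have hall : ∀ c ∈ ver, PySem.Chars.isdigit c := by
      have := hd
      simp only [PySem.Chars.strIsdigit, Bool.and_eq_true, List.all_eq_true] at this
      exact this.2
    have hlen : pvDigitPrefixLen ver = ver.length := pvPrefixLen_all hall
    have hpos : 0 < ver.length := List.length_pos_iff.2 h
    simp only [hlen, if_pos hpos, List.take_length, List.drop_length]
  · rw [if_neg hd]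
    have hlt : pvDigitPrefixLen ver < ver.length := by
      rcases Nat.lt_or_ge (pvDigitPrefixLen ver) ver.length with hlt | hge
      · exact hlt
      · exfalso
        have heq : pvDigitPrefixLen ver = ver.length := le_antisymm (pvPrefixLen_le ver) hge
        apply hd
        simp [PySem.Chars.strIsdigit, h, List.all_eq_true]
        exact fun c hc => pvAll_of_prefixLen_eq heq c hc
    rw [pvScanA_eq]
    simp only [List.drop_zero, Nat.zero_add]
    rw [if_pos hlt]

lemma pvDispatch_eq (op : String) (diff sgn : Int) (hsgn : ¬ sgn = 0)
    (hpos : diff > 0 ↔ sgn > 0) (hneg : diff < 0 ↔ sgn < 0) :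
    (if op = "eq" then false
     else if op = "ne" then true
     else if op = "ge" ∨ op = "gt" then decide (diff > 0)
     else if op = "le" ∨ op = "lt" then decide (diff < 0) else false) = pvRes op sgn := by
  unfold pvRes
  rw [if_neg hsgn]
  split_ifs <;> simp [hpos, hneg]

lemma pvMainA_eq (v1 v2 : List (List Char)) (operation : String)
    (h1 : ∀ c ∈ v1, c ≠ []) (h2 : ∀ c ∈ v2, c ≠ []) (i : Nat) :
    pvMainA v1 v2 operation (max v1.length v2.length) i =
      pvRes operation (pvSign
        (((v1.map pvKeyOne ++ List.replicate (max v1.length v2.length - v1.length) ((0 : Int), ([] : List Char))).zip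
          (v2.map pvKeyOne ++ List.replicate (max v1.length v2.length - v2.length) ((0 : Int), ([] : List Char)))).drop i)) := by
  set n := max v1.length v2.length with hn
  set k1 := v1.map pvKeyOne ++ List.replicate (n - v1.length) ((0 : Int), ([] : List Char)) with hk1def
  set k2 := v2.map pvKeyOne ++ List.replicate (n - v2.length) ((0 : Int), ([] : List Char)) with hk2def
  have hl1 : v1.length ≤ n := le_max_left _ _
  have hl2 : v2.length ≤ n := le_max_right _ _
  have hk1 : k1.length = n := by rw [hk1def]; simp; omega
  have hk2 : k2.length = n := by rw [hk2def]; simp; omega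
  clear_value n k1 k2
  suffices H : ∀ fuel i, n - i ≤ fuel →
      pvMainA v1 v2 operation n i = pvRes operation (pvSign ((k1.zip k2).drop i)) from
    H _ i le_rfl
  intro fuel
  induction fuel with
  | zero =>
    intro i hi
    have h : ¬ i < n := by omega
    rw [pvMainA, if_neg h,
        List.drop_eq_nil_of_le (by rw [List.length_zip, hk1, hk2]; omega)]
    simp [pvSign, pvRes]
  | succ fuel ih =>
    intro i hi
    by_cases h : i < n
    · have hiz : i < (k1.zip k2).length := by rw [List.length_zip, hk1, hk2]; omega
      have hi1 : i < k1.length := by omega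
      have hi2 : i < k2.length := by omega
      rw [pvMainA, if_pos h]
      set ver1 : List Char := if i < v1.length then v1.getD i [] else ['0'] with hver1
      set ver2 : List Char := if i < v2.length then v2.getD i [] else ['0'] with hver2
      have hne1 : ver1 ≠ [] := by
        rw [hver1]; split
        · next hlt => rw [List.getD_eq_getElem _ _ hlt]; exact h1 _ (List.getElem_mem hlt)
        · simp
      have hne2 : ver2 ≠ [] := by
        rw [hver2]; split
        · next hlt => rw [List.getD_eq_getElem _ _ hlt]; exact h2 _ (List.getElem_mem hlt)
        · simp
      have he1 : k1[i] = pvKeyOne ver1 := by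
        rw [hver1]; simp only [hk1def]
        by_cases hlt : i < v1.length
        · rw [if_pos hlt, List.getD_eq_getElem _ _ hlt,
              List.getElem_append_left (by simpa using hlt)]
          simp
        · rw [if_neg hlt, List.getElem_append_right (by simpa using Nat.le_of_not_lt hlt)]
          rw [List.getElem_replicate]
          decide
      have he2 : k2[i] = pvKeyOne ver2 := by
        rw [hver2]; simp only [hk2def]
        by_cases hlt : i < v2.length
        · rw [if_pos hlt, List.getD_eq_getElem _ _ hlt,
              List.getElem_append_left (by simpa using hlt)]
          simp
        · rw [if_neg hlt, List.getElem_append_right (by simpa using Nat.le_of_not_lt hlt)]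
          rw [List.getElem_replicate]
          decide
      have hz : (k1.zip k2).drop i
          = (pvKeyOne ver1, pvKeyOne ver2) :: (k1.zip k2).drop (i + 1) := by
        rw [List.drop_eq_getElem_cons hiz, List.getElem_zip, he1, he2]
      rw [hz]
      dsimp only
      rw [pvParse_agree hne1, pvParse_agree hne2]
      rcases hp1 : pvKeyOne ver1 with ⟨n1, s1⟩
      rcases hp2 : pvKeyOne ver2 with ⟨n2, s2⟩
      dsimp only
      by_cases hnum : n1 = n2
      · subst hnum
        rw [if_neg (by simp)]
        by_cases hsuf : s1 = s2
        · subst hsuf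
          rw [if_pos rfl]
          dsimp only
          rw [pvSign, if_neg (show ¬(n1 ≠ n1) by simp), if_neg (show ¬(s1 ≠ s1) by simp)]
          exact ih (i + 1) (by omega)
        · rw [if_neg hsuf]
          rw [pvSign, if_neg (show ¬(n1 ≠ n1) by simp), if_pos hsuf]
          by_cases hlt : s2 < s1
          · rw [if_pos hlt, if_pos hlt]
            exact pvDispatch_eq operation 1 1 (by decide) Iff.rfl Iff.rfl
          · rw [if_neg hlt, if_neg hlt]
            exact pvDispatch_eq operation (-1) (-1) (by decide) Iff.rfl Iff.rfl
      · rw [if_pos (by simpa using hnum)]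
        dsimp only
        rw [pvSign, if_pos hnum]
        exact pvDispatch_eq operation (n1 - n2) (if n2 < n1 then 1 else -1)
          (by split_ifs <;> decide)
          (by split_ifs with hlt <;> constructor <;> intro <;> omega)
          (by split_ifs with hlt <;> constructor <;> intro <;> omega)
    · have : (k1.zip k2).drop i = [] :=
        List.drop_eq_nil_of_le (by rw [List.length_zip, hk1, hk2]; omega)
      rw [pvMainA, if_neg h, this]
      simp [pvSign, pvRes]

-- B's whole-list comparisons expressed through the sign of the first differing key pair
lemma pvEq_iff_sign {k1 k2 : List (Int × List Char)} (hlen : k1.length = k2.length) :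
    k1 = k2 ↔ pvSign (k1.zip k2) = 0 := by
  induction k1 generalizing k2 with
  | nil => cases k2 with
    | nil => simp [pvSign]
    | cons b bs => simp at hlen
  | cons a as ih =>
    cases k2 with
    | nil => simp at hlen
    | cons b bs =>
      rcases a with ⟨n1, s1⟩
      rcases b with ⟨n2, s2⟩
      simp only [List.zip_cons_cons, List.cons_eq_cons, Prod.mk.injEq]
      by_cases hnum : n1 = n2
      · subst hnum
        by_cases hsuf : s1 = s2
        · subst hsuf
          have hs : pvSign (((n1, s1), (n1, s1)) :: as.zip bs) = pvSign (as.zip bs) := by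
            simp [pvSign]
          rw [hs]
          simpa using ih (by simpa using hlen)
        · have hs : pvSign (((n1, s1), (n1, s2)) :: as.zip bs)
              = (if s2 < s1 then 1 else -1) := by simp [pvSign, hsuf]
          rw [hs]
          constructor
          · intro hh; exact absurd hh.1.2 hsuf
          · intro hh; exfalso; split_ifs at hh <;> simp at hh
      · have hs : pvSign (((n1, s1), (n2, s2)) :: as.zip bs)
            = (if n2 < n1 then 1 else -1) := by simp [pvSign, hnum]
        rw [hs]
        constructor
        · intro hh; exact absurd hh.1.1 hnum
        · intro hh; exfalso; split_ifs at hh <;> simp at hh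

lemma pvGt_eq_sign {k1 k2 : List (Int × List Char)} (hlen : k1.length = k2.length) :
    pvListGt k1 k2 = decide (0 < pvSign (k1.zip k2)) := by
  induction k1 generalizing k2 with
  | nil => cases k2 with
    | nil => simp [pvListGt, pvSign]
    | cons b bs => simp at hlen
  | cons a as ih =>
    cases k2 with
    | nil => simp at hlen
    | cons b bs =>
      rcases a with ⟨n1, s1⟩
      rcases b with ⟨n2, s2⟩
      simp only [List.zip_cons_cons]
      by_cases hnum : n1 = n2
      · subst hnum
        by_cases hsuf : s1 = s2
        · subst hsuf
          have hs : pvSign (((n1, s1), (n1, s1)) :: as.zip bs) = pvSign (as.zip bs) := by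
            simp [pvSign]
          rw [pvListGt, if_pos rfl]
          simp only [hs]
          exact ih (by simpa using hlen)
        · have hne : ((n1, s1) : Int × List Char) ≠ (n1, s2) := by simp [hsuf]
          have hs : pvSign (((n1, s1), (n1, s2)) :: as.zip bs)
              = (if s2 < s1 then 1 else -1) := by simp [pvSign, hsuf]
          rw [pvListGt, if_neg hne]
          simp only [hs]
          by_cases hlt : s2 < s1 <;> simp [hlt]
      · have hne : ((n1, s1) : Int × List Char) ≠ (n2, s2) := by simp [hnum]
        have hs : pvSign (((n1, s1), (n2, s2)) :: as.zip bs)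
            = (if n2 < n1 then 1 else -1) := by simp [pvSign, hnum]
        rw [pvListGt, if_neg hne]
        simp only [hs]
        by_cases hlt : n2 < n1 <;> simp [hlt, hnum]

lemma pvLt_eq_sign {k1 k2 : List (Int × List Char)} (hlen : k1.length = k2.length) :
    pvListLt k1 k2 = decide (pvSign (k1.zip k2) < 0) := by
  induction k1 generalizing k2 with
  | nil => cases k2 with
    | nil => simp [pvListLt, pvSign]
    | cons b bs => simp at hlen
  | cons a as ih =>
    cases k2 with
    | nil => simp at hlen
    | cons b bs =>
      rcases a with ⟨n1, s1⟩
      rcases b with ⟨n2, s2⟩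
      simp only [List.zip_cons_cons]
      by_cases hnum : n1 = n2
      · subst hnum
        by_cases hsuf : s1 = s2
        · subst hsuf
          have hs : pvSign (((n1, s1), (n1, s1)) :: as.zip bs) = pvSign (as.zip bs) := by
            simp [pvSign]
          rw [pvListLt, if_pos rfl]
          simp only [hs]
          exact ih (by simpa using hlen)
        · have hne : ((n1, s1) : Int × List Char) ≠ (n1, s2) := by simp [hsuf]
          have hs : pvSign (((n1, s1), (n1, s2)) :: as.zip bs)
              = (if s2 < s1 then 1 else -1) := by simp [pvSign, hsuf]
          rw [pvListLt, if_neg hne]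
          simp only [hs]
          by_cases hlt : s2 < s1
          · have h1 : ¬ s1 < s2 := fun hc => absurd (lt_trans hc hlt) (lt_irrefl s1)
            simp [hlt, h1]
          · have h1 : s1 < s2 := by
              rcases lt_trichotomy s1 s2 with h | h | h
              · exact h
              · exact absurd h hsuf
              · exact absurd h hlt
            simp [hlt, h1]
      · have hne : ((n1, s1) : Int × List Char) ≠ (n2, s2) := by simp [hnum]
        have hs : pvSign (((n1, s1), (n2, s2)) :: as.zip bs)
            = (if n2 < n1 then 1 else -1) := by simp [pvSign, hnum]
        rw [pvListLt, if_neg hne]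
        simp only [hs]
        by_cases hlt : n2 < n1
        · have h1 : ¬ n1 < n2 := by omega
          simp [hlt, h1, hnum]
        · have h1 : n1 < n2 := by omega
          simp [hlt, h1]

lemma pvKeyList_eq (v : List (List Char)) (n : Nat) :
    pvKeyList v n = v.map pvKeyOne ++ List.replicate (n - v.length) ((0 : Int), ([] : List Char)) := by
  unfold pvKeyList
  rw [List.map_append, List.map_replicate]
  rfl

lemma pvAnswerB_eq (v1 v2 : List (List Char)) (operation : String) :
    pvAnswerB v1 v2 operation =
      pvRes operation (pvSign
        (((v1.map pvKeyOne ++ List.replicate (max v1.length v2.length - v1.length) ((0 : Int), ([] : List Char))).zip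
          (v2.map pvKeyOne ++ List.replicate (max v1.length v2.length - v2.length) ((0 : Int), ([] : List Char)))))) := by
  unfold pvAnswerB
  dsimp only
  rw [pvKeyList_eq, pvKeyList_eq]
  set k1 := v1.map pvKeyOne ++ List.replicate (max v1.length v2.length - v1.length) ((0 : Int), ([] : List Char)) with hk1
  set k2 := v2.map pvKeyOne ++ List.replicate (max v1.length v2.length - v2.length) ((0 : Int), ([] : List Char)) with hk2
  have hlen : k1.length = k2.length := by
    rw [hk1, hk2]
    simp only [List.length_append, List.length_map, List.length_replicate]
    have := le_max_left v1.length v2.length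
    have := le_max_right v1.length v2.length
    omega
  clear_value k1 k2
  unfold pvRes
  by_cases heq : k1 = k2
  · rw [if_pos heq, if_pos ((pvEq_iff_sign hlen).1 heq)]
  · rw [if_neg heq, if_neg (fun h => heq ((pvEq_iff_sign hlen).2 h))]
    split_ifs with h1 h2 h3 h4
    · rfl
    · rfl
    · exact pvGt_eq_sign hlen
    · exact pvLt_eq_sign hlen
    · rfl

lemma pvMain_answer (v1 v2 : List (List Char)) (operation : String)
    (h1 : ∀ c ∈ v1, c ≠ []) (h2 : ∀ c ∈ v2, c ≠ []) :
    pvMainA v1 v2 operation (max v1.length v2.length) 0 = pvAnswerB v1 v2 operation := by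
  rw [pvMainA_eq v1 v2 operation h1 h2 0, pvAnswerB_eq]
  rfl

-- ===== VERDICT (by name: the statement is the Claim_ definition above) =====
theorem EvaluateVersionComparison_spec : Claim_equal_EvaluateVersionComparison := by
  intro version operation ref_version os_name driver_vendor _hdom hpre
  unfold Spec_EvaluateVersionComparison EvaluateVersionComparison EvaluateVersionComparison_alt
  set v1 := ((PySem.Str.split? version ".").getD []).map String.toList with hv1
  set v2 := ((PySem.Str.split? ref_version ".").getD []).map String.toList with hv2
  have hmem : ∀ (hv : ∀ c ∈ (PySem.Str.split? version ".").getD [], c ≠ ""),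
      ∀ c ∈ v1, c ≠ [] := by
    intro hv c hc
    obtain ⟨x, hx, rfl⟩ := List.mem_map.1 hc
    simp only [ne_eq, String.toList_eq_nil_iff]
    exact hv x hx
  have hmem' : ∀ (hr : ∀ c ∈ (PySem.Str.split? ref_version ".").getD [], c ≠ ""),
      ∀ c ∈ v2, c ≠ [] := by
    intro hr c hc
    obtain ⟨x, hx, rfl⟩ := List.mem_map.1 hc
    simp only [ne_eq, String.toList_eq_nil_iff]
    exact hr x hx
  by_cases hwin : os_name = some "win" ∧ driver_vendor = some "intel"
  · rw [if_pos hwin, if_pos hwin]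
    by_cases hlen : v1.length ≠ 4 ∨ v2.length ≠ 4
    · rw [if_pos hlen]
      have : ¬ pvVersionsCanBeComparedA v1 v2 = true := by
        simp only [pvVersionsCanBeComparedA, if_pos hlen]
        exact Bool.false_ne_true
      rw [if_pos this]
    · rw [if_neg hlen]
      have hcmp : pvVersionsCanBeComparedA v1 v2 = true := by
        simp only [pvVersionsCanBeComparedA, if_neg hlen]
      rw [if_neg (by simp [hcmp])]
      obtain hshort | ⟨hv, hr, _⟩ := hpre
      · exfalso
        apply hlen
        rcases hshort.2.2 with h | h
        · exact Or.inl (by rw [hv1, List.length_map]; exact h)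
        · exact Or.inr (by rw [hv2, List.length_map]; exact h)
      · have hs1 : PySem.List.slice v1 (some 2) none = v1.drop 2 := by
          rw [PySem.List.slice_from v1 (by norm_num)]; rfl
        have hs2 : PySem.List.slice v2 (some 2) none = v2.drop 2 := by
          rw [PySem.List.slice_from v2 (by norm_num)]; rfl
        rw [hs1, hs2]
        exact pvMain_answer _ _ operation
          (fun c hc => hmem hv c (List.mem_of_mem_drop hc))
          (fun c hc => hmem' hr c (List.mem_of_mem_drop hc))
  · rw [if_neg hwin, if_neg hwin]
    obtain hshort | ⟨hv, hr, _⟩ := hpre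
    · exact absurd ⟨hshort.1, hshort.2.1⟩ hwin
    · exact pvMain_answer v1 v2 operation (hmem hv) (hmem' hr)
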